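-- pv_equiv track=rewrite | github.com/shimeon8129/investment-os | reporting/daily_decision_dashboard.py | build_portfolio_candidate_sections
-- ===== SOURCE A (Python) =====
-- def build_portfolio_candidate_sections(review_rows: list) -> str:
--     buckets = {
--         "HELD_AND_CANDIDATE": [],
--         "HELD_NOT_CANDIDATE": [],
--         "CANDIDATE_NOT_HELD": [],
--     }
--
--     for row in review_rows:
--         status = row.get("position_status")
--         if status in buckets:
--             buckets[status].append(row)
--
--     lines = [
--         "## 4. Portfolio vs Candidate Buckets",
--         "",
--         "### 4.1 Held and Candidate",
--         "",
--     ]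
--
--     if buckets["HELD_AND_CANDIDATE"]:
--         for row in buckets["HELD_AND_CANDIDATE"]:
--             lines.append(
--                 f"- {row.get('ticker')} {row.get('name')} — "
--                 f"shares: {row.get('shares')}, "
--                 f"score: {row.get('scanner_score')}, "
--                 f"signal: {row.get('signal')}"
--             )
--     else:
--         lines.append("- None")
--
--     lines.extend([
--         "",
--         "### 4.2 Held but Not Candidate",
--         "",
--     ])
--
--     if buckets["HELD_NOT_CANDIDATE"]:
--         for row in buckets["HELD_NOT_CANDIDATE"]:
--             lines.append(
--                 f"- {row.get('ticker')} {row.get('name')} — "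
--                 f"shares: {row.get('shares')}; "
--                 "manual review required."
--             )
--     else:
--         lines.append("- None")
--
--     lines.extend([
--         "",
--         "### 4.3 Candidate but Not Held",
--         "",
--     ])
--
--     if buckets["CANDIDATE_NOT_HELD"]:
--         for row in buckets["CANDIDATE_NOT_HELD"][:20]:
--             lines.append(
--                 f"- {row.get('ticker')} {row.get('name')} — "
--                 f"score: {row.get('scanner_score')}, "
--                 f"signal: {row.get('signal')}"
--             )
--
--         if len(buckets["CANDIDATE_NOT_HELD"]) > 20:
--             lines.append(f"- ... {len(buckets['CANDIDATE_NOT_HELD']) - 20} more")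
--     else:
--         lines.append("- None")
--
--     return "\n".join(lines)
-- ===== SOURCE B (Python) =====
-- def build_portfolio_candidate_sections(review_rows: list) -> str:
--     def rows_with(status):
--         return [r for r in review_rows if r.get("position_status") == status]
--
--     def section(rows, fmt):
--         return [fmt(r) for r in rows] if rows else ["- None"]
--
--     held_cand = rows_with("HELD_AND_CANDIDATE")
--     held_not = rows_with("HELD_NOT_CANDIDATE")
--     cand_not = rows_with("CANDIDATE_NOT_HELD")
--
--     if cand_not:
--         third = [
--             f"- {r.get('ticker')} {r.get('name')} — "
--             f"score: {r.get('scanner_score')}, "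
--             f"signal: {r.get('signal')}"
--             for r in cand_not[:20]
--         ]
--         if len(cand_not) > 20:
--             third.append(f"- ... {len(cand_not) - 20} more")
--     else:
--         third = ["- None"]
--
--     lines = (
--         ["## 4. Portfolio vs Candidate Buckets", "", "### 4.1 Held and Candidate", ""]
--         + section(held_cand, lambda r:
--                   f"- {r.get('ticker')} {r.get('name')} — "
--                   f"shares: {r.get('shares')}, "
--                   f"score: {r.get('scanner_score')}, "
--                   f"signal: {r.get('signal')}")
--         + ["", "### 4.2 Held but Not Candidate", ""]
--         + section(held_not, lambda r:
--                   f"- {r.get('ticker')} {r.get('name')} — "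
--                   f"shares: {r.get('shares')}; "
--                   "manual review required.")
--         + ["", "### 4.3 Candidate but Not Held", ""]
--         + third
--     )
--     return "\n".join(lines)
-- ===== Notes on version B (the rewrite author's own statement) =====
-- stated objective: simpler
-- what changed: Dropped the buckets dict and the single grouping pass; each of the three sections now computes its rows directly with a filtering comprehension over review_rows and formats them with map-style comprehensions instead of append-in-a-loop.
import Mathlib
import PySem

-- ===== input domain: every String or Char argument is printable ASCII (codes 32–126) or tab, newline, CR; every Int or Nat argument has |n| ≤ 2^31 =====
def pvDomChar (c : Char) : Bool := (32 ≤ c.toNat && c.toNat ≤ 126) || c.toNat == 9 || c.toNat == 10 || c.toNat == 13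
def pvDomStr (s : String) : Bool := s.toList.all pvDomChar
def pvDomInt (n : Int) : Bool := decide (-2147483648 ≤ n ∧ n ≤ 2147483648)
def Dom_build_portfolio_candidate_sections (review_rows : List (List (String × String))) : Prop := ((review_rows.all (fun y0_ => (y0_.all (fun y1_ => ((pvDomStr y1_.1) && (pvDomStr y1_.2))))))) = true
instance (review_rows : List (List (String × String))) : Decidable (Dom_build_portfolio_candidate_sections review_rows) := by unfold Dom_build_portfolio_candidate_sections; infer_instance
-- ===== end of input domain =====

-- B replaces A's grouping dict and single bucketing pass by three independent
-- filtering passes (one per section); objective: simpler (same output, same asymptotics).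

-- ===== PORT A =====
-- row.get(k) interpolated into an f-string: missing key prints "None"
def pvGetA (row : List (String × String)) (k : String) : String :=
  ((PySem.Dict.mk row).get? k).getD "None"

def pvFoldBuckets (review_rows : List (List (String × String)))
    (d : PySem.Dict String (List (List (String × String)))) :
    PySem.Dict String (List (List (String × String))) :=
  review_rows.foldl (fun b row =>
    match (PySem.Dict.mk row).get? "position_status" with
    | some s => if b.contains s then b.modify s [] (fun l => l ++ [row]) else b
    | none => b) d

def build_portfolio_candidate_sections (review_rows : List (List (String × String))) : String :=
  let buckets : PySem.Dict String (List (List (String × String))) :=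
    PySem.Dict.mk [("HELD_AND_CANDIDATE", []), ("HELD_NOT_CANDIDATE", []), ("CANDIDATE_NOT_HELD", [])]
  let buckets := pvFoldBuckets review_rows buckets
  let lines : List String :=
    ["## 4. Portfolio vs Candidate Buckets", "", "### 4.1 Held and Candidate", ""]
  let hc := buckets.getD "HELD_AND_CANDIDATE" []
  let lines := if hc ≠ [] then
      hc.foldl (fun ls row => ls ++ ["- " ++ pvGetA row "ticker" ++ " " ++ pvGetA row "name" ++
        " — shares: " ++ pvGetA row "shares" ++ ", score: " ++ pvGetA row "scanner_score" ++
        ", signal: " ++ pvGetA row "signal"]) lines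
    else lines ++ ["- None"]
  let lines := lines ++ ["", "### 4.2 Held but Not Candidate", ""]
  let hn := buckets.getD "HELD_NOT_CANDIDATE" []
  let lines := if hn ≠ [] then
      hn.foldl (fun ls row => ls ++ ["- " ++ pvGetA row "ticker" ++ " " ++ pvGetA row "name" ++
        " — shares: " ++ pvGetA row "shares" ++ "; manual review required."]) lines
    else lines ++ ["- None"]
  let lines := lines ++ ["", "### 4.3 Candidate but Not Held", ""]
  let cn := buckets.getD "CANDIDATE_NOT_HELD" []
  let lines := if cn ≠ [] then
      let lines := (PySem.List.slice cn none (some 20)).foldl (fun ls row =>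
        ls ++ ["- " ++ pvGetA row "ticker" ++ " " ++ pvGetA row "name" ++
          " — score: " ++ pvGetA row "scanner_score" ++ ", signal: " ++ pvGetA row "signal"]) lines
      if (cn.length : Int) > 20 then
        lines ++ ["- ... " ++ PySem.Int.toStr ((cn.length : Int) - 20) ++ " more"]
      else lines
    else lines ++ ["- None"]
  PySem.Str.join "\n" lines

-- ===== PORT B =====
def pvGetB (row : List (String × String)) (k : String) : String :=
  ((PySem.Dict.mk row).get? k).getD "None"

def pvRowsWith (review_rows : List (List (String × String))) (status : String) :
    List (List (String × String)) :=
  review_rows.filter (fun r => (PySem.Dict.mk r).get? "position_status" == some status)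

def pvSection (rows : List (List (String × String)))
    (fmt : List (String × String) → String) : List String :=
  if rows ≠ [] then rows.map fmt else ["- None"]

def build_portfolio_candidate_sections_alt (review_rows : List (List (String × String))) : String :=
  let held_cand := pvRowsWith review_rows "HELD_AND_CANDIDATE"
  let held_not := pvRowsWith review_rows "HELD_NOT_CANDIDATE"
  let cand_not := pvRowsWith review_rows "CANDIDATE_NOT_HELD"
  let third : List String :=
    if cand_not ≠ [] then
      let t := (PySem.List.slice cand_not none (some 20)).map (fun r =>
        "- " ++ pvGetB r "ticker" ++ " " ++ pvGetB r "name" ++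
        " — score: " ++ pvGetB r "scanner_score" ++ ", signal: " ++ pvGetB r "signal")
      if (cand_not.length : Int) > 20 then
        t ++ ["- ... " ++ PySem.Int.toStr ((cand_not.length : Int) - 20) ++ " more"]
      else t
    else ["- None"]
  PySem.Str.join "\n"
    (["## 4. Portfolio vs Candidate Buckets", "", "### 4.1 Held and Candidate", ""]
      ++ pvSection held_cand (fun r =>
          "- " ++ pvGetB r "ticker" ++ " " ++ pvGetB r "name" ++
          " — shares: " ++ pvGetB r "shares" ++ ", score: " ++ pvGetB r "scanner_score" ++
          ", signal: " ++ pvGetB r "signal")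
      ++ ["", "### 4.2 Held but Not Candidate", ""]
      ++ pvSection held_not (fun r =>
          "- " ++ pvGetB r "ticker" ++ " " ++ pvGetB r "name" ++
          " — shares: " ++ pvGetB r "shares" ++ "; manual review required.")
      ++ ["", "### 4.3 Candidate but Not Held", ""]
      ++ third)

-- ===== PRECONDITION & SPEC =====
def Spec_build_portfolio_candidate_sections (review_rows : List (List (String × String))) (out : String) : Prop := out = build_portfolio_candidate_sections_alt review_rows
instance (review_rows : List (List (String × String))) (out : String) : Decidable (Spec_build_portfolio_candidate_sections review_rows out) := by unfold Spec_build_portfolio_candidate_sections; infer_instance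

-- ===== CLAIM (what is proved, stated in full; the proofs are below) =====
def Claim_equal_build_portfolio_candidate_sections : Prop := ∀ (review_rows : List (List (String × String))), Dom_build_portfolio_candidate_sections review_rows → Spec_build_portfolio_candidate_sections review_rows (build_portfolio_candidate_sections review_rows)

-- ===== LEMMAS AND PROOFS =====

-- appending one formatted line per row equals mapping the formatter
theorem pv_foldl_append_map {α : Type} (f : α → String) :
    ∀ (l : List α) (init : List String),
      l.foldl (fun ls r => ls ++ [f r]) init = init ++ l.map f := by
  intro l
  induction l with
  | nil => intro init; simp
  | cons x xs ih => intro init; simp [List.foldl, ih]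

-- the bucketing fold, read off at any of the dict's three keys, is a filter
theorem pv_buckets_getD (K : String) :
    ∀ (rs : List (List (String × String)))
      (d : PySem.Dict String (List (List (String × String)))),
      (∀ s, d.contains s = true ↔ (s = "HELD_AND_CANDIDATE" ∨ s = "HELD_NOT_CANDIDATE" ∨ s = "CANDIDATE_NOT_HELD")) →
      d.contains K = true →
      (pvFoldBuckets rs d).getD K [] =
        d.getD K [] ++ rs.filter (fun r => (PySem.Dict.mk r).get? "position_status" == some K) := by
  intro rs
  induction rs with
  | nil => intro d _ _; simp [pvFoldBuckets]
  | cons r rs ih =>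
    intro d hd hK
    have hstep : pvFoldBuckets (r :: rs) d = pvFoldBuckets rs
        (match (PySem.Dict.mk r).get? "position_status" with
         | some s => if d.contains s then d.modify s [] (fun l => l ++ [r]) else d
         | none => d) := rfl
    rw [hstep]
    cases hps : (PySem.Dict.mk r).get? "position_status" with
    | none =>
      simp only [hps]
      rw [ih d hd hK]
      simp [hps]
    | some s =>
      simp only [hps]
      by_cases hcs : d.contains s = true
      · simp only [hcs, if_true]
        have hd' : ∀ t, (d.modify s [] (fun l => l ++ [r])).contains t = true ↔
            (t = "HELD_AND_CANDIDATE" ∨ t = "HELD_NOT_CANDIDATE" ∨ t = "CANDIDATE_NOT_HELD") := by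
          intro t
          rw [PySem.Dict.contains_modify]
          by_cases hts : t = s
          · subst hts
            simp only [beq_self_eq_true, Bool.true_or, true_iff]
            exact (hd t).mp hcs
          · simp [beq_eq_false_iff_ne.mpr hts, hd t]
        have hK' : (d.modify s [] (fun l => l ++ [r])).contains K = true := by
          rw [PySem.Dict.contains_modify]
          simp [hK]
        rw [ih _ hd' hK', PySem.Dict.getD_modify]
        by_cases hKs : K = s
        · subst hKs
          simp [hps]
        · rw [if_neg hKs]
          have hsK : (s == K) = false := beq_eq_false_iff_ne.mpr (fun h => hKs h.symm)
          simp [hps, hsK]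
      · rw [if_neg hcs]
        rw [ih d hd hK]
        have hsK : (s == K) = false :=
          beq_eq_false_iff_ne.mpr (fun h => hcs (by rw [h]; exact hK))
        simp [hps, hsK]

-- ===== VERDICT (by name: the statement is the Claim_ definition above) =====
theorem build_portfolio_candidate_sections_spec : Claim_equal_build_portfolio_candidate_sections := by
  intro rs _
  show build_portfolio_candidate_sections rs = build_portfolio_candidate_sections_alt rs
  have hcont : ∀ s, (PySem.Dict.mk ([("HELD_AND_CANDIDATE", ([] : List (List (String × String)))), ("HELD_NOT_CANDIDATE", []), ("CANDIDATE_NOT_HELD", [])])).contains s = true ↔ (s = "HELD_AND_CANDIDATE" ∨ s = "HELD_NOT_CANDIDATE" ∨ s = "CANDIDATE_NOT_HELD") := by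
    intro s
    rw [PySem.Dict.contains_mk]
    simp only [List.any_cons, List.any_nil, Bool.or_eq_true, beq_iff_eq]
    constructor
    · rintro (h|h|h|h) <;> simp_all [eq_comm]
    · rintro (h|h|h) <;> simp_all
  have h1 : (pvFoldBuckets rs (PySem.Dict.mk [("HELD_AND_CANDIDATE", []), ("HELD_NOT_CANDIDATE", []), ("CANDIDATE_NOT_HELD", [])])).getD "HELD_AND_CANDIDATE" [] = pvRowsWith rs "HELD_AND_CANDIDATE" := by
    rw [pv_buckets_getD "HELD_AND_CANDIDATE" rs _ hcont (by decide)]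
    have hinit : (PySem.Dict.mk ([("HELD_AND_CANDIDATE", ([] : List (List (String × String)))), ("HELD_NOT_CANDIDATE", []), ("CANDIDATE_NOT_HELD", [])])).getD "HELD_AND_CANDIDATE" [] = [] := by decide
    rw [hinit]; simp [pvRowsWith]
  have h2 : (pvFoldBuckets rs (PySem.Dict.mk [("HELD_AND_CANDIDATE", []), ("HELD_NOT_CANDIDATE", []), ("CANDIDATE_NOT_HELD", [])])).getD "HELD_NOT_CANDIDATE" [] = pvRowsWith rs "HELD_NOT_CANDIDATE" := by
    rw [pv_buckets_getD "HELD_NOT_CANDIDATE" rs _ hcont (by decide)]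
    have hinit : (PySem.Dict.mk ([("HELD_AND_CANDIDATE", ([] : List (List (String × String)))), ("HELD_NOT_CANDIDATE", []), ("CANDIDATE_NOT_HELD", [])])).getD "HELD_NOT_CANDIDATE" [] = [] := by decide
    rw [hinit]; simp [pvRowsWith]
  have h3 : (pvFoldBuckets rs (PySem.Dict.mk [("HELD_AND_CANDIDATE", []), ("HELD_NOT_CANDIDATE", []), ("CANDIDATE_NOT_HELD", [])])).getD "CANDIDATE_NOT_HELD" [] = pvRowsWith rs "CANDIDATE_NOT_HELD" := by
    rw [pv_buckets_getD "CANDIDATE_NOT_HELD" rs _ hcont (by decide)]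
    have hinit : (PySem.Dict.mk ([("HELD_AND_CANDIDATE", ([] : List (List (String × String)))), ("HELD_NOT_CANDIDATE", []), ("CANDIDATE_NOT_HELD", [])])).getD "CANDIDATE_NOT_HELD" [] = [] := by decide
    rw [hinit]; simp [pvRowsWith]
  simp only [build_portfolio_candidate_sections, build_portfolio_candidate_sections_alt,
    h1, h2, h3, pvSection, pvGetA, pvGetB, pv_foldl_append_map]
  split_ifs <;> simp_all [List.append_assoc]
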